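-- pv_equiv track=rewrite | github.com/Lama999901/metagenesis-core-public | sdk/metagenesis.py | _layer_name_to_key
-- ===== SOURCE A (Python) =====
-- def _layer_name_to_key(name: str) -> str:
--     """Convert layer display name to dict key.
--
--     'Layer 1 -- SHA-256 Integrity' -> 'integrity'
--     """
--     mapping = {
--         "layer 1": "integrity",
--         "layer 2": "semantic",
--         "layer 3": "step_chain",
--         "layer 4": "signature",
--         "layer 5": "temporal",
--     }
--     lower = name.lower()
--     for prefix, key in mapping.items():
--         if lower.startswith(prefix):
--             return key
--     return lower.replace(" ", "_").replace("-", "_")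
-- ===== SOURCE B (Python) =====
-- _LAYER_KEYS = ["integrity", "semantic", "step_chain", "signature", "temporal"]
--
--
-- def _layer_name_to_key(name: str) -> str:
--     """Convert layer display name to dict key (positional parse, no prefix scan)."""
--     lower = name.lower()
--     if lower.startswith("layer ") and len(lower) >= 7 and "1" <= lower[6] <= "5":
--         return _LAYER_KEYS[ord(lower[6]) - ord("1")]
--     return lower.replace(" ", "_").replace("-", "_")
-- ===== Notes on version B (the rewrite author's own statement) =====
-- stated objective: idiomatic
-- what changed: Replaces the scan over a five-entry prefix dict with a single positional parse: check the fixed prefix 'layer ' once, read the digit at index 6 and index an ordered key list by position.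
import Mathlib
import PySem

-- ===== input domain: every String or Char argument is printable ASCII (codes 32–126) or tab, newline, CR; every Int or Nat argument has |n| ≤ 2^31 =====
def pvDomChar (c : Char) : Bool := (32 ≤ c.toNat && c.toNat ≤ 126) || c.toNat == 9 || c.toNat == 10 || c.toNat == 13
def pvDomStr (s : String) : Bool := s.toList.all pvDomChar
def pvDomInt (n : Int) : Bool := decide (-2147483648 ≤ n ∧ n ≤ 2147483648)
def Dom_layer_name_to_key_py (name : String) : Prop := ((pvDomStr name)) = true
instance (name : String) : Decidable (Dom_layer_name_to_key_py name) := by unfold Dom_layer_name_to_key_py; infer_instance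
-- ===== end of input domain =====

-- B replaces A's scan over the five-entry prefix dict by one positional parse (check the fixed
-- six-character prefix once, read the digit at index 6, index an ordered key list); objective: idiomatic.

-- ===== PORT A =====
-- the 'for prefix, key in mapping.items(): if lower.startswith(prefix): return key' loop,
-- falling through to the replace-chain
def pvALoop (lower : String) : List (String × String) → String
  | [] => PySem.Str.replace (PySem.Str.replace lower " " "_") "-" "_"
  | (pre, key) :: rest =>
      if PySem.Str.startswith lower pre then key else pvALoop lower rest

def layer_name_to_key_py (name : String) : String :=
  let mapping : List (String × String) :=
    [("layer 1", "integrity"), ("layer 2", "semantic"), ("layer 3", "step_chain"),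
     ("layer 4", "signature"), ("layer 5", "temporal")]
  let lower := PySem.Str.lower name
  pvALoop lower mapping

-- ===== PORT B =====
def pvLayerKeys : List String := ["integrity", "semantic", "step_chain", "signature", "temporal"]

def layer_name_to_key_py_alt (name : String) : String :=
  let lower := PySem.Str.lower name
  let c := (PySem.Str.pyGet? lower 6).getD ' '   -- lower[6]; only used under the length guard
  if PySem.Str.startswith lower "layer " && decide (7 ≤ PySem.Str.len lower)
       && decide ('1' ≤ c) && decide (c ≤ '5') then
    pvLayerKeys.getD (c.toNat - '1'.toNat) ""
  else
    PySem.Str.replace (PySem.Str.replace lower " " "_") "-" "_"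

-- ===== PRECONDITION & SPEC =====
def Spec_layer_name_to_key_py (name : String) (out : String) : Prop := out = layer_name_to_key_py_alt name
instance (name : String) (out : String) : Decidable (Spec_layer_name_to_key_py name out) := by unfold Spec_layer_name_to_key_py; infer_instance

-- ===== CLAIM (what is proved, stated in full; the proofs are below) =====
def Claim_equal_layer_name_to_key_py : Prop := ∀ (name : String), Dom_layer_name_to_key_py name → Spec_layer_name_to_key_py name (layer_name_to_key_py name)

-- ===== LEMMAS AND PROOFS =====

lemma pv_prefix_snoc_iff (p : List Char) (c : Char) (l : List Char) :
    (p ++ [c]) <+: l ↔ p <+: l ∧ l[p.length]? = some c := by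
  constructor
  · rintro ⟨t, rfl⟩
    refine ⟨⟨[c] ++ t, by simp⟩, ?_⟩
    simp
  · rintro ⟨⟨r, rfl⟩, h⟩
    rw [List.getElem?_append_right (le_refl _)] at h
    simp at h
    match r, h with
    | c :: r', _ => exact ⟨r', by simp_all⟩

lemma pv_char_le_toNat {a b : Char} (h : a ≤ b) : a.toNat ≤ b.toNat := by
  rw [Char.le_def, UInt32.le_iff_toNat_le] at h; exact h

lemma pv_char_eq_of_toNat {a b : Char} (h : a.toNat = b.toNat) : a = b := by
  apply Char.ext; rw [← UInt32.toNat_inj] at *; exact h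

lemma pv_core (s : String) :
    pvALoop s [("layer 1", "integrity"), ("layer 2", "semantic"), ("layer 3", "step_chain"),
               ("layer 4", "signature"), ("layer 5", "temporal")]
      = (let c := (PySem.Str.pyGet? s 6).getD ' '
         if PySem.Str.startswith s "layer " && decide (7 ≤ PySem.Str.len s)
              && decide ('1' ≤ c) && decide (c ≤ '5') then
           pvLayerKeys.getD (c.toNat - '1'.toNat) ""
         else
           PySem.Str.replace (PySem.Str.replace s " " "_") "-" "_") := by
  have hL : s.toList.length = s.length := String.length_toList
  have gen : ∀ c : Char, PySem.Chars.startswith s.toList ['l','a','y','e','r',' ',c] = true ↔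
      (['l','a','y','e','r',' '] <+: s.toList ∧ s.toList[6]? = some c) := by
    intro c
    rw [PySem.Chars.startswith_iff,
        show (['l','a','y','e','r',' ',c] : List Char) = ['l','a','y','e','r',' '] ++ [c] from rfl,
        pv_prefix_snoc_iff]
    simp
  by_cases hp : ['l','a','y','e','r',' '] <+: s.toList
  · have hps : PySem.Chars.startswith s.toList ['l','a','y','e','r',' '] = true := by
      simp [PySem.Chars.startswith_iff, hp]
    cases h6 : s.toList[6]? with
    | none =>
      have hlen : ¬ 7 ≤ s.length := by
        rw [← hL]
        simp at h6
        omega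
      simp [pvALoop, PySem.Str.startswith_eq, PySem.Str.pyGet?_eq,
        PySem.Chars.pyGet?_eq_listPyGet?, PySem.List.pyGet?_of_nonneg,
        PySem.Str.len_eq, gen, hp, h6, hps, hlen]
    | some c =>
      have hlen : 7 ≤ s.length := by
        rw [← hL]
        have := (List.getElem?_eq_some_iff.mp h6).1
        omega
      by_cases hc1 : c = '1'
      · subst hc1
        simp [pvALoop, PySem.Str.startswith_eq, PySem.Str.pyGet?_eq,
          PySem.Chars.pyGet?_eq_listPyGet?, PySem.List.pyGet?_of_nonneg,
          PySem.Str.len_eq, gen, hp, h6, hps, hlen, pvLayerKeys]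
      by_cases hc2 : c = '2'
      · subst hc2
        simp [pvALoop, PySem.Str.startswith_eq, PySem.Str.pyGet?_eq,
          PySem.Chars.pyGet?_eq_listPyGet?, PySem.List.pyGet?_of_nonneg,
          PySem.Str.len_eq, gen, hp, h6, hps, hlen, hc1, pvLayerKeys]
      by_cases hc3 : c = '3'
      · subst hc3
        simp [pvALoop, PySem.Str.startswith_eq, PySem.Str.pyGet?_eq,
          PySem.Chars.pyGet?_eq_listPyGet?, PySem.List.pyGet?_of_nonneg,
          PySem.Str.len_eq, gen, hp, h6, hps, hlen, hc1, hc2, pvLayerKeys]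
      by_cases hc4 : c = '4'
      · subst hc4
        simp [pvALoop, PySem.Str.startswith_eq, PySem.Str.pyGet?_eq,
          PySem.Chars.pyGet?_eq_listPyGet?, PySem.List.pyGet?_of_nonneg,
          PySem.Str.len_eq, gen, hp, h6, hps, hlen, hc1, hc2, hc3, pvLayerKeys]
      by_cases hc5 : c = '5'
      · subst hc5
        simp [pvALoop, PySem.Str.startswith_eq, PySem.Str.pyGet?_eq,
          PySem.Chars.pyGet?_eq_listPyGet?, PySem.List.pyGet?_of_nonneg,
          PySem.Str.len_eq, gen, hp, h6, hps, hlen, hc1, hc2, hc3, hc4, pvLayerKeys]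
      · have hguard : ¬ ('1' ≤ c ∧ c ≤ '5') := by
          rintro ⟨ha, hb⟩
          have ha' := pv_char_le_toNat ha
          have hb' := pv_char_le_toNat hb
          have e1 : ('1' : Char).toNat = 49 := by decide
          have e5 : ('5' : Char).toNat = 53 := by decide
          rw [e1] at ha'; rw [e5] at hb'
          have : c.toNat = 49 ∨ c.toNat = 50 ∨ c.toNat = 51 ∨ c.toNat = 52 ∨ c.toNat = 53 := by omega
          rcases this with h | h | h | h | h
          · exact hc1 (pv_char_eq_of_toNat (by rw [h]; decide))
          · exact hc2 (pv_char_eq_of_toNat (by rw [h]; decide))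
          · exact hc3 (pv_char_eq_of_toNat (by rw [h]; decide))
          · exact hc4 (pv_char_eq_of_toNat (by rw [h]; decide))
          · exact hc5 (pv_char_eq_of_toNat (by rw [h]; decide))
        simp [pvALoop, PySem.Str.startswith_eq, PySem.Str.pyGet?_eq,
          PySem.Chars.pyGet?_eq_listPyGet?, PySem.List.pyGet?_of_nonneg,
          PySem.Str.len_eq, gen, hp, h6, hps, hlen, hc1, hc2, hc3, hc4, hc5]
        intro h1 h2
        exact absurd ⟨h1, h2⟩ hguard
  · have hps : PySem.Chars.startswith s.toList ['l','a','y','e','r',' '] = false := by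
      rw [Bool.eq_false_iff]
      intro h
      exact hp ((PySem.Chars.startswith_iff _ _).mp h)
    have hd : ∀ c : Char, PySem.Chars.startswith s.toList ['l','a','y','e','r',' ',c] = false := by
      intro c
      rw [Bool.eq_false_iff]
      intro h
      exact hp ((gen c).mp h).1
    simp [pvALoop, PySem.Str.startswith_eq, hd, hps]

-- ===== VERDICT (by name: the statement is the Claim_ definition above) =====
theorem layer_name_to_key_py_spec : Claim_equal_layer_name_to_key_py := by
  intro name _
  unfold Spec_layer_name_to_key_py layer_name_to_key_py layer_name_to_key_py_alt
  exact pv_core (PySem.Str.lower name)
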